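-- pv_equiv track=rewrite | github.com/ffranco07/Images | main.py | convert_message
-- ===== SOURCE A (Python) =====
-- def convert_message(message):
--     message_bits = []
--
--     for char in message:
--         num = ord(char)
--         bin_num = bin(num)[2:]
--
--         for i in range(0, 8 - len(bin_num)):
--             message_bits.append(0)
--         for bit in bin_num:
--             message_bits.append(int(bit))
--
--     return message_bits
-- ===== SOURCE B (Python) =====
-- def convert_message(message):
--     return [(ord(c) >> i) & 1
--             for c in message
--             for i in range(max(8, ord(c).bit_length()) - 1, -1, -1)]
-- ===== Notes on version B (the rewrite author's own statement) =====
-- stated objective: idiomatic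
-- what changed: Replaces the bin()-string conversion, zero-padding loop and int(bit) parsing with a single flat comprehension emitting bits by shift-and-mask over width max(8, bit_length).
import Mathlib
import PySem

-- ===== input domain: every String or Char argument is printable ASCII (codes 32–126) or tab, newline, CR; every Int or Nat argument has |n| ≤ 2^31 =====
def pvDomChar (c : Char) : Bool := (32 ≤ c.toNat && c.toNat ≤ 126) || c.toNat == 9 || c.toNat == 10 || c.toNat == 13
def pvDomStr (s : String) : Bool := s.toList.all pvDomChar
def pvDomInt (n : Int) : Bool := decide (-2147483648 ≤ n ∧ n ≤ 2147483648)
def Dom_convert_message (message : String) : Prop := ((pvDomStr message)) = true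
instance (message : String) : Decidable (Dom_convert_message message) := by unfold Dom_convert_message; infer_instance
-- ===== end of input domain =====

-- B replaces A's bin()-string formatting, zero-padding loop and per-digit parsing with a
-- single flat comprehension emitting each bit by shift-and-mask (objective: idiomatic).

-- ===== PORT A =====
-- bin(num)[2:] — Python's builtin binary formatting, ported as base-2 Nat.toDigits
-- (exact for n ≥ 0, including bin(0)[2:] = "0" ↔ toDigits 2 0 = ['0']).
def pvBinNum (n : Nat) : List Char := Nat.toDigits 2 n

def convert_message (message : String) : List Int :=
  message.toList.foldl
    (fun message_bits char =>
      let num := char.toNat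
      let bin_num := pvBinNum num
      -- for i in range(0, 8 - len(bin_num)): append 0
      -- for bit in bin_num: append int(bit)
      (message_bits ++ List.replicate (8 - bin_num.length) (0 : Int))
        ++ bin_num.map (fun bit => if bit = '1' then (1 : Int) else 0))
    []

-- ===== PORT B =====
def convert_message_alt (message : String) : List Int :=
  message.toList.flatMap (fun c =>
    let num := c.toNat
    (List.range (max 8 (Nat.size num))).reverse.map
      (fun i => (((num >>> i) &&& 1 : Nat) : Int)))

-- ===== PRECONDITION & SPEC =====
def Spec_convert_message (message : String) (out : List Int) : Prop := out = convert_message_alt message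
instance (message : String) (out : List Int) : Decidable (Spec_convert_message message out) := by unfold Spec_convert_message; infer_instance

-- ===== CLAIM (what is proved, stated in full; the proofs are below) =====
def Claim_equal_convert_message : Prop := ∀ (message : String), Dom_convert_message message → Spec_convert_message message (convert_message message)

-- ===== LEMMAS AND PROOFS =====

def pvEncA (n : Nat) : List Int :=
  List.replicate (8 - (pvBinNum n).length) (0 : Int)
    ++ (pvBinNum n).map (fun bit => if bit = '1' then (1 : Int) else 0)

def pvEncB (n : Nat) : List Int :=
  (List.range (max 8 (Nat.size n))).reverse.map
    (fun i => (((n >>> i) &&& 1 : Nat) : Int))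

theorem pvEnc_eq : ∀ n < 127, pvEncA n = pvEncB n := by decide

theorem pv_foldl_flat (f : Char → List Int) :
    ∀ (l : List Char) (acc : List Int),
      l.foldl (fun a c => a ++ f c) acc = acc ++ l.flatMap f := by
  intro l
  induction l with
  | nil => simp
  | cons c t ih => intro acc; simp [List.foldl, ih, List.flatMap_cons]

theorem pvA_flat (message : String) :
    convert_message message = message.toList.flatMap (fun c => pvEncA c.toNat) := by
  unfold convert_message
  rw [show (fun (message_bits : List Int) (char : Char) =>
      (message_bits ++ List.replicate (8 - (pvBinNum char.toNat).length) (0 : Int))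
        ++ (pvBinNum char.toNat).map (fun bit => if bit = '1' then (1 : Int) else 0))
      = fun a c => a ++ pvEncA c.toNat from by
    funext a c; simp [pvEncA]]
  rw [pv_foldl_flat (fun c => pvEncA c.toNat)]
  simp

-- ===== VERDICT (by name: the statement is the Claim_ definition above) =====
theorem convert_message_spec : Claim_equal_convert_message := by
  intro message hdom
  unfold Spec_convert_message
  rw [pvA_flat]
  unfold convert_message_alt
  simp only [List.flatMap]
  congr 1
  apply List.map_congr_left
  intro c hc
  have hch : pvDomChar c = true := by
    have := (List.all_eq_true.mp hdom) c hc
    simpa using this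
  have hlt : c.toNat < 127 := by
    unfold pvDomChar at hch
    simp only [Bool.or_eq_true, Bool.and_eq_true, beq_iff_eq, decide_eq_true_eq] at hch
    omega
  have := pvEnc_eq c.toNat hlt
  simpa [pvEncA, pvEncB] using this
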